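-- pv_equiv track=rewrite | github.com/kenny0MG/ProjectPythonMPT | project.py | sum_of_date
-- ===== SOURCE A (Python) =====
-- def sum_of_date(year):
--
--     total = 0
--
--     if (year % 4 == 0 and year % 100 != 0) or year % 400 == 0:
--         leap_year = True
--     else:
--         leap_year = False
--
--     for month in range(1, 13):
--
--         if month in [1, 3, 5, 7, 8, 10, 12]:
--             days = 31
--
--         elif month in [4 ,6 ,9 ,11]:
--             days = 30
--
--         else:
--             if leap_year:
--                 days = 29
--
--             else:
--                 days = 28
--
--         for day in range(1 ,days + 1):
--
--             total += sum([int(x) for x in str(day)])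
--
--     return total
-- ===== SOURCE B (Python) =====
-- def sum_of_date(year):
--     # prefix table: S[n] = sum of digit-sums of 1..n, for n = 0..31
--     S = [0]
--     for n in range(1, 32):
--         S.append(S[-1] + sum(int(x) for x in str(n)))
--     leap = (year % 4 == 0 and year % 100 != 0) or year % 400 == 0
--     lengths = [31, 29 if leap else 28, 31, 30, 31, 30, 31, 31, 30, 31, 30, 31]
--     return sum(S[l] for l in lengths)
-- ===== Notes on version B (the rewrite author's own statement) =====
-- stated objective: simpler
-- what changed: Replaces the nested month/day loops by a one-pass prefix table of cumulative digit-sums over possible month lengths, so each month contributes a single table lookup S[length].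
import Mathlib
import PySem

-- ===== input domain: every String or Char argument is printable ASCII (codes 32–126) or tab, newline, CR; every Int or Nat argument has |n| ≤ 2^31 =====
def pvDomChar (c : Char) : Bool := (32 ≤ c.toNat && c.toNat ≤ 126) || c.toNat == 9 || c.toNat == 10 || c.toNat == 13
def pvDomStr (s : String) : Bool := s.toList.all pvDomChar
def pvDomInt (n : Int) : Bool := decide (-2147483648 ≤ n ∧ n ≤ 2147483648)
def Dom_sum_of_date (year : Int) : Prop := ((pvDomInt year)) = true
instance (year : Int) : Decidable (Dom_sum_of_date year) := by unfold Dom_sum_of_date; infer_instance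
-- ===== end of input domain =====

-- B replaces the day-by-day nested loops with a cumulative digit-sum prefix table
-- and one lookup per month (objective: simpler).


-- ===== PORT A =====
-- digit sum of day: sum([int(x) for x in str(day)]); int(x) never fails here (digits of a positive day),
-- the getD 0 default is unreachable — exact on this use.
def pvDigitSumA (day : Int) : Int :=
  (((PySem.Int.toStr day).toList.map (fun x => (PySem.Int.ofStr? (String.mk [x])).getD 0)).sum)

def sum_of_date (year : Int) : Int :=
  let leap_year : Bool :=
    if (PySem.Int.mod year 4 = 0 ∧ PySem.Int.mod year 100 ≠ 0) ∨ PySem.Int.mod year 400 = 0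
    then true else false
  (PySem.List.pyRange 1 13 1).foldl (fun total month =>
    let days : Int :=
      if month ∈ ([1, 3, 5, 7, 8, 10, 12] : List Int) then 31
      else if month ∈ ([4, 6, 9, 11] : List Int) then 30
      else if leap_year then 29 else 28
    (PySem.List.pyRange 1 (days + 1) 1).foldl (fun t day => t + pvDigitSumA day) total) 0

-- ===== PORT B =====
-- Source B's sum(int(x) for x in str(n)) is the same expression as A's digit sum; shared helper.
def sum_of_date_alt (year : Int) : Int :=
  let S : List Int :=
    (PySem.List.pyRange 1 32 1).foldl (fun S n => S ++ [(S.getLastD 0) + pvDigitSumA n]) [0]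
  let leap : Bool :=
    if (PySem.Int.mod year 4 = 0 ∧ PySem.Int.mod year 100 ≠ 0) ∨ PySem.Int.mod year 400 = 0
    then true else false
  let lengths : List Int := [31, if leap then 29 else 28, 31, 30, 31, 30, 31, 31, 30, 31, 30, 31]
  (lengths.map (fun l => (PySem.List.pyGet? S l).getD 0)).sum

-- ===== PRECONDITION & SPEC =====
def Spec_sum_of_date (year : Int) (out : Int) : Prop := out = sum_of_date_alt year
instance (year : Int) (out : Int) : Decidable (Spec_sum_of_date year out) := by unfold Spec_sum_of_date; infer_instance

-- ===== CLAIM (what is proved, stated in full; the proofs are below) =====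
def Claim_equal_sum_of_date : Prop := ∀ (year : Int), Dom_sum_of_date year → Spec_sum_of_date year (sum_of_date year)

-- ===== LEMMAS AND PROOFS =====

set_option maxRecDepth 4000 in
-- Once the leap flag is fixed, both programs are closed computations; check both flag values by decide.
theorem pvClosed (b : Bool) :
    ((PySem.List.pyRange 1 13 1).foldl (fun total month =>
      let days : Int :=
        if month ∈ ([1, 3, 5, 7, 8, 10, 12] : List Int) then 31
        else if month ∈ ([4, 6, 9, 11] : List Int) then 30
        else if b then 29 else 28
      (PySem.List.pyRange 1 (days + 1) 1).foldl (fun t day => t + pvDigitSumA day) total) 0)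
    =
    (let S : List Int :=
      (PySem.List.pyRange 1 32 1).foldl (fun S n => S ++ [(S.getLastD 0) + pvDigitSumA n]) [0]
     (([31, if b then 29 else 28, 31, 30, 31, 30, 31, 31, 30, 31, 30, 31] : List Int).map
        (fun l => (PySem.List.pyGet? S l).getD 0)).sum) := by
  cases b <;> decide

-- ===== VERDICT (by name: the statement is the Claim_ definition above) =====
theorem sum_of_date_spec : Claim_equal_sum_of_date := by
  intro year _
  unfold Spec_sum_of_date sum_of_date sum_of_date_alt
  exact pvClosed _
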